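-- pv_equiv track=rewrite | github.com/alanwatts07/drift-agents | discord_bot.py | parse_agent
-- ===== SOURCE A (Python) =====
-- ALIASES = {
--     "max": "max", "max_anvil": "max", "anvil": "max",
--     "beth": "beth", "bethany": "beth", "finkel": "beth",
--     "susan": "susan", "casiodega": "susan", "judge": "susan",
--     "deb": "debater", "debater": "debater", "great_debater": "debater",
--     "the_great_debater": "debater", "debate": "debater",
--     "gerald": "gerald", "boxford": "gerald", "fraud": "gerald",
--     "all": "all",
-- }
--
-- def parse_agent(text: str) -> tuple[str | None, str]:
--     """Parse 'agent: task' or 'agent, task' format."""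
--     lower = text.lower()
--     for prefix in sorted(ALIASES, key=len, reverse=True):
--         for sep in (":", ","):
--             if lower.startswith(prefix + sep):
--                 task = text[len(prefix) + 1:].strip()
--                 return ALIASES[prefix], task
--     return None, text
-- ===== SOURCE B (Python) =====
-- ALIASES = {
--     "max": "max", "max_anvil": "max", "anvil": "max",
--     "beth": "beth", "bethany": "beth", "finkel": "beth",
--     "susan": "susan", "casiodega": "susan", "judge": "susan",
--     "deb": "debater", "debater": "debater", "great_debater": "debater",
--     "the_great_debater": "debater", "debate": "debater",
--     "gerald": "gerald", "boxford": "gerald", "fraud": "gerald",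
--     "all": "all",
-- }
--
-- def parse_agent(text: str) -> tuple[str | None, str]:
--     """Parse 'agent: task' or 'agent, task' format.
--
--     Instead of scanning every alias with both separators, split once at the
--     earliest ':' or ',' and look the candidate up in the alias table."""
--     lower = text.lower()
--     cands = [i for i in (lower.find(":"), lower.find(",")) if i != -1]
--     if not cands:
--         return None, text
--     idx = min(cands)
--     agent = ALIASES.get(lower[:idx])
--     if agent is None:
--         return None, text
--     return agent, text[idx + 1:].strip()
-- ===== Notes on version B (the rewrite author's own statement) =====
-- stated objective: idiomatic
-- what changed: A scans all 18 aliases (longest first) testing startswith for each alias x separator pair; B splits the text once at the earliest ':' or ',' (via two find calls and a min) and does a single dictionary lookup of the lowercased candidate.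
import Mathlib
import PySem

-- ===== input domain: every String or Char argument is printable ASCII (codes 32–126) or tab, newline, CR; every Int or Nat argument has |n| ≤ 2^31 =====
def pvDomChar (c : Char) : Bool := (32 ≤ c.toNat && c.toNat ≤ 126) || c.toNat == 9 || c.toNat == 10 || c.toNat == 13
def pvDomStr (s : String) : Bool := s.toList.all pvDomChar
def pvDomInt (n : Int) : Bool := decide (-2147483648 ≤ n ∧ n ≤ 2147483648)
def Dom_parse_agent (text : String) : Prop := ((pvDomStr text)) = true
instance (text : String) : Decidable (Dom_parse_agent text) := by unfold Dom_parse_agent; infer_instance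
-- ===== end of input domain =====

-- B replaces A's scan over every alias × separator with a single split at the
-- earliest ':' or ',' and one dictionary lookup (objective: alternative/idiomatic).

-- ===== PORT A =====
-- ALIASES, in Python insertion order
def pvAliases : PySem.Dict String String := PySem.Dict.ofList
  [("max", "max"), ("max_anvil", "max"), ("anvil", "max"),
   ("beth", "beth"), ("bethany", "beth"), ("finkel", "beth"),
   ("susan", "susan"), ("casiodega", "susan"), ("judge", "susan"),
   ("deb", "debater"), ("debater", "debater"), ("great_debater", "debater"),
   ("the_great_debater", "debater"), ("debate", "debater"),
   ("gerald", "gerald"), ("boxford", "gerald"), ("fraud", "gerald"),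
   ("all", "all")]

-- inner loop `for sep in (":", ","):` with its early return as an Option
def pvInnerA (text lower p : String) : List String → Option (Option String × String)
  | [] => none
  | sep :: rest =>
    if PySem.Str.startswith lower (p ++ sep) then
      -- ALIASES[prefix]: the key is always present here (prefix ranges over ALIASES' keys)
      some (PySem.Dict.get? pvAliases p,
            PySem.Str.strip (PySem.Str.slice text (some (PySem.Str.len p + 1)) none))
    else pvInnerA text lower p rest

-- outer loop `for prefix in sorted(ALIASES, key=len, reverse=True):`
def pvOuterA (text lower : String) : List String → Option String × String
  | [] => (none, text)
  | p :: rest =>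
    match pvInnerA text lower p [":", ","] with
    | some r => r
    | none => pvOuterA text lower rest

def parse_agent (text : String) : Option String × String :=
  pvOuterA text (PySem.Str.lower text)
    (PySem.List.sorted (PySem.Dict.keys pvAliases) (fun s => PySem.Str.len s) true)

-- ===== PORT B =====
def parse_agent_alt (text : String) : Option String × String :=
  let lower := PySem.Str.lower text
  let cands := [PySem.Str.find lower ":", PySem.Str.find lower ","].filter (fun i => i != -1)
  match PySem.List.min? cands id with
  | none => (none, text)                 -- `if not cands: return None, text`
  | some idx =>
    match PySem.Dict.get? pvAliases (PySem.Str.slice lower none (some idx)) with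
    | none => (none, text)
    | some agent =>
        (some agent, PySem.Str.strip (PySem.Str.slice text (some (idx + 1)) none))

-- ===== PRECONDITION & SPEC =====
def Spec_parse_agent (text : String) (out : Option String × String) : Prop := out = parse_agent_alt text
instance (text : String) (out : Option String × String) : Decidable (Spec_parse_agent text out) := by unfold Spec_parse_agent; infer_instance

-- ===== CLAIM (what is proved, stated in full; the proofs are below) =====
def Claim_equal_parse_agent : Prop := ∀ (text : String), Dom_parse_agent text → Spec_parse_agent text (parse_agent text)

-- ===== LEMMAS AND PROOFS =====

-- [c] is a prefix of t iff t starts with the character c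
theorem pv_singleton_prefix (c : Char) (t : List Char) : [c] <+: t ↔ t.head? = some c := by
  cases t with
  | nil => simp
  | cons a t =>
    constructor
    · rintro ⟨u, hu⟩
      simp only [List.singleton_append, List.cons.injEq] at hu
      simp [hu.1]
    · intro h
      simp only [List.head?_cons, Option.some.injEq] at h
      exact ⟨t, by simp [h]⟩

-- appending one character to a prefix: p ++ [c] prefixes m iff p does and m carries c right after p
theorem pv_prefix_append_singleton (pl : List Char) (c : Char) (m : List Char) :
    (pl ++ [c]) <+: m ↔ pl <+: m ∧ m[pl.length]? = some c := by
  constructor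
  · rintro ⟨t, ht⟩
    subst ht
    refine ⟨⟨c :: t, by simp⟩, ?_⟩
    rw [List.append_assoc, List.singleton_append,
        List.getElem?_append_right (le_refl _), Nat.sub_self]
    rfl
  · rintro ⟨⟨t, ht⟩, hc⟩
    subst ht
    rw [List.getElem?_append_right (le_refl _), Nat.sub_self, ← List.head?_eq_getElem?,
        ← pv_singleton_prefix] at hc
    obtain ⟨u, hu⟩ := hc
    exact ⟨u, by rw [← hu, List.append_assoc, List.singleton_append]⟩

-- what Chars.find of a single-character needle means
theorem pv_find_char_none (m : List Char) (c : Char) (h : PySem.Chars.find m [c] = -1) :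
    ∀ j : Nat, m[j]? ≠ some c := by
  intro j hj
  rw [PySem.Chars.find_eq_neg_one_iff, List.singleton_infix_iff] at h
  exact h (List.mem_of_getElem? hj)

theorem pv_find_char_some (m : List Char) (c : Char) (h : 0 ≤ PySem.Chars.find m [c]) :
    m[(PySem.Chars.find m [c]).toNat]? = some c ∧
      ∀ j < (PySem.Chars.find m [c]).toNat, m[j]? ≠ some c := by
  obtain ⟨h1, h2⟩ := PySem.Chars.find_spec h
  rw [pv_singleton_prefix, List.head?_drop] at h1
  refine ⟨h1, fun j hj hc => h2 j hj ?_⟩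
  rw [pv_singleton_prefix, List.head?_drop]
  exact hc

-- the central characterisation: with i the position of m's first separator,
-- a separator-free prefix pl followed by separator c' matches iff pl = m.take i and c' is that separator
theorem pv_branch_iff (m pl : List Char) (i : Nat) (c : Char)
    (hp1 : ':' ∉ pl) (hp2 : ',' ∉ pl)
    (hc : m[i]? = some c) (hsep : c = ':' ∨ c = ',')
    (hmin : ∀ j < i, m[j]? ≠ some ':' ∧ m[j]? ≠ some ',')
    (c' : Char) (hc' : c' = ':' ∨ c' = ',') :
    ((pl ++ [c']) <+: m) ↔ (pl = m.take i ∧ c' = c) := by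
  rw [pv_prefix_append_singleton]
  constructor
  · rintro ⟨hpre, hat⟩
    have hlen : pl.length = i := by
      rcases Nat.lt_trichotomy pl.length i with h | h | h
      · exfalso
        rcases hc' with rfl | rfl
        · exact (hmin _ h).1 hat
        · exact (hmin _ h).2 hat
      · exact h
      · exfalso
        obtain ⟨t, ht⟩ := hpre
        rw [← ht, List.getElem?_append_left h] at hc
        have hcm : c ∈ pl := List.mem_of_getElem? hc
        rcases hsep with rfl | rfl
        · exact hp1 hcm
        · exact hp2 hcm
    refine ⟨?_, ?_⟩
    · have := List.prefix_iff_eq_take.mp hpre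
      rwa [hlen] at this
    · rw [hlen] at hat
      exact Option.some.inj (hat.symm.trans hc)
  · rintro ⟨rfl, rfl⟩
    obtain ⟨hilen, -⟩ := List.getElem?_eq_some_iff.mp hc
    refine ⟨List.take_prefix i m, ?_⟩
    have hlen : (m.take i).length = i := by simp [Nat.le_of_lt hilen]
    rw [hlen]
    exact hc

-- a startswith branch of A can not fire when its separator occurs nowhere in `lower`
theorem pv_sw_false (lower p : String) (c : Char) (sep : String) (hsep : sep.toList = [c])
    (h : ∀ j : Nat, lower.toList[j]? ≠ some c) :
    PySem.Str.startswith lower (p ++ sep) = false := by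
  rw [PySem.Str.startswith_eq]
  apply Bool.eq_false_iff.mpr
  intro hT
  have hpre := (PySem.Chars.startswith_iff _ _).mp hT
  rw [String.toList_append, hsep] at hpre
  exact h _ ((pv_prefix_append_singleton _ _ _).mp hpre).2

-- A's scan when `lower` contains no separator at all
theorem pv_outer_no_sep (text lower : String) (P : List String)
    (h1 : ∀ j : Nat, lower.toList[j]? ≠ some ':')
    (h2 : ∀ j : Nat, lower.toList[j]? ≠ some ',') :
    pvOuterA text lower P = (none, text) := by
  induction P with
  | nil => rfl
  | cons p rest ih =>
    have e1 := pv_sw_false lower p ':' ":" rfl h1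
    have e2 := pv_sw_false lower p ',' "," rfl h2
    simp only [pvOuterA, pvInnerA, e1, e2, Bool.false_eq_true, if_false]
    exact ih

-- A's scan when `lower` has its first separator c at position i:
-- it returns the table entry of lower[:i] iff that candidate is in the list, else the default
theorem pv_outer_sep (text lower : String) (i : Nat) (c : Char)
    (hc : lower.toList[i]? = some c) (hsep : c = ':' ∨ c = ',')
    (hmin : ∀ j < i, lower.toList[j]? ≠ some ':' ∧ lower.toList[j]? ≠ some ',')
    (P : List String)
    (hP : ∀ p ∈ P, ':' ∉ p.toList ∧ ',' ∉ p.toList) :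
    pvOuterA text lower P =
      if String.ofList (lower.toList.take i) ∈ P then
        (PySem.Dict.get? pvAliases (String.ofList (lower.toList.take i)),
         PySem.Str.strip (PySem.Str.slice text (some ((i : Int) + 1)) none))
      else (none, text) := by
  obtain ⟨hilen, -⟩ := List.getElem?_eq_some_iff.mp hc
  induction P with
  | nil => simp [pvOuterA]
  | cons p rest ih =>
    obtain ⟨hp1, hp2⟩ := hP p (by simp)
    have key : ∀ (sep : String) (c' : Char), sep.toList = [c'] → c' = ':' ∨ c' = ',' →
        (PySem.Str.startswith lower (p ++ sep) = true ↔
          (p.toList = lower.toList.take i ∧ c' = c)) := by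
      intro sep c' hsl hc'
      rw [PySem.Str.startswith_eq, PySem.Chars.startswith_iff, String.toList_append, hsl]
      exact pv_branch_iff lower.toList p.toList i c hp1 hp2 hc hsep hmin c' hc'
    have hmk : (String.ofList (lower.toList.take i) = p) ↔ (p.toList = lower.toList.take i) := by
      constructor
      · intro h; rw [← h]; simp
      · intro h
        apply String.toList_inj.mp
        simp [h]
    by_cases hmatch : p.toList = lower.toList.take i
    · have hplen : (PySem.Str.len p : Int) = (i : Int) := by
        rw [PySem.Str.len_eq, hmatch]
        have hL : i ≤ lower.length := by
          rw [← String.length_toList]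
          exact Nat.le_of_lt hilen
        simp [hL]
      have hmem : String.ofList (lower.toList.take i) ∈ p :: rest := by
        simp [hmk.mpr hmatch]
      rw [if_pos hmem]
      rcases hsep with rfl | rfl
      · have e1 : PySem.Str.startswith lower (p ++ ":") = true := (key ":" ':' rfl (Or.inl rfl)).mpr ⟨hmatch, rfl⟩
        simp only [pvOuterA, pvInnerA, e1, if_true]
        rw [hmk.mpr hmatch, hplen]
      · have e1 : PySem.Str.startswith lower (p ++ ":") = false := by
          apply Bool.eq_false_iff.mpr
          intro hT
          exact absurd ((key ":" ':' rfl (Or.inl rfl)).mp hT).2 (by decide)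
        have e2 : PySem.Str.startswith lower (p ++ ",") = true := (key "," ',' rfl (Or.inr rfl)).mpr ⟨hmatch, rfl⟩
        simp only [pvOuterA, pvInnerA, e1, e2, Bool.false_eq_true, if_false, if_true]
        rw [hmk.mpr hmatch, hplen]
    · have e1 : PySem.Str.startswith lower (p ++ ":") = false := by
        apply Bool.eq_false_iff.mpr
        intro hT
        exact hmatch ((key ":" ':' rfl (Or.inl rfl)).mp hT).1
      have e2 : PySem.Str.startswith lower (p ++ ",") = false := by
        apply Bool.eq_false_iff.mpr
        intro hT
        exact hmatch ((key "," ',' rfl (Or.inr rfl)).mp hT).1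
      have hmem : (String.ofList (lower.toList.take i) ∈ p :: rest) ↔ (String.ofList (lower.toList.take i) ∈ rest) := by
        simp only [List.mem_cons]
        constructor
        · rintro (h | h)
          · exact absurd (hmk.mp h) hmatch
          · exact h
        · exact Or.inr
      simp only [pvOuterA, pvInnerA, e1, e2, Bool.false_eq_true, if_false]
      rw [ih (fun q hq => hP q (by simp [hq]))]
      by_cases hr : String.ofList (lower.toList.take i) ∈ rest
      · rw [if_pos hr, if_pos (hmem.mpr hr)]
      · rw [if_neg hr, if_neg (fun h => hr (hmem.mp h))]

-- the concrete key list of pvAliases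
theorem pv_keys : PySem.Dict.keys pvAliases =
    ["max", "max_anvil", "anvil", "beth", "bethany", "finkel", "susan", "casiodega", "judge",
     "deb", "debater", "great_debater", "the_great_debater", "debate", "gerald", "boxford",
     "fraud", "all"] := by decide

-- every alias is separator-free
theorem pv_keys_sep_free :
    ∀ p ∈ PySem.List.sorted (PySem.Dict.keys pvAliases) (fun s => PySem.Str.len s) true,
      ':' ∉ p.toList ∧ ',' ∉ p.toList := by
  intro p hp
  rw [PySem.List.mem_sorted, pv_keys] at hp
  fin_cases hp <;> exact ⟨by decide, by decide⟩

-- A's scan with first separator at i equals B's lookup-shaped result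
theorem pv_case_sep (text lower : String) (i : Nat) (c : Char)
    (hc : lower.toList[i]? = some c) (hsep : c = ':' ∨ c = ',')
    (hmin : ∀ j < i, lower.toList[j]? ≠ some ':' ∧ lower.toList[j]? ≠ some ',') :
    pvOuterA text lower (PySem.List.sorted (PySem.Dict.keys pvAliases) (fun s => PySem.Str.len s) true) =
      match PySem.Dict.get? pvAliases (PySem.Str.slice lower none (some (i : Int))) with
      | none => (none, text)
      | some agent =>
          (some agent, PySem.Str.strip (PySem.Str.slice text (some ((i : Int) + 1)) none)) := by
  rw [pv_outer_sep text lower i c hc hsep hmin _ pv_keys_sep_free]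
  have hcand : PySem.Str.slice lower none (some (i : Int)) = String.ofList (lower.toList.take i) := by
    apply String.toList_inj.mp
    rw [PySem.Str.toList_slice]
    simp [PySem.List.slice_to _ (Int.natCast_nonneg i), PySem.Chars.slice_eq_listSlice]
  rw [hcand]
  rcases hg : PySem.Dict.get? pvAliases (String.ofList (lower.toList.take i)) with _ | a
  · have hnot : String.ofList (lower.toList.take i) ∉
        PySem.List.sorted (PySem.Dict.keys pvAliases) (fun s => PySem.Str.len s) true := by
      rw [PySem.List.mem_sorted]
      exact (PySem.Dict.get?_eq_none_iff_not_mem_keys _ _).mp hg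
    rw [if_neg hnot]
  · have hmem : String.ofList (lower.toList.take i) ∈
        PySem.List.sorted (PySem.Dict.keys pvAliases) (fun s => PySem.Str.len s) true := by
      rw [PySem.List.mem_sorted]
      by_contra h
      rw [← PySem.Dict.get?_eq_none_iff_not_mem_keys] at h
      rw [h] at hg
      cases hg
    rw [if_pos hmem]

theorem pv_main (text : String) : parse_agent text = parse_agent_alt text := by
  unfold parse_agent parse_agent_alt
  simp only []
  have hT1 : (":" : String).toList = [':'] := rfl
  have hT2 : ("," : String).toList = [','] := rfl
  have hf1 : PySem.Str.find (PySem.Str.lower text) ":" = PySem.Chars.find (PySem.Str.lower text).toList [':'] := by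
    rw [PySem.Str.find_eq, hT1]
  have hf2 : PySem.Str.find (PySem.Str.lower text) "," = PySem.Chars.find (PySem.Str.lower text).toList [','] := by
    rw [PySem.Str.find_eq, hT2]
  set lower := PySem.Str.lower text with hlowdef
  set f1 := PySem.Chars.find lower.toList [':'] with hF1
  set f2 := PySem.Chars.find lower.toList [','] with hF2
  rw [hf1, hf2]
  have hb1 : -1 ≤ f1 := PySem.Chars.neg_one_le_find lower.toList [':']
  have hb2 : -1 ≤ f2 := PySem.Chars.neg_one_le_find lower.toList [',']
  by_cases h1 : f1 = -1 <;> by_cases h2 : f2 = -1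
  · -- no separator anywhere
    rw [pv_outer_no_sep text lower _ (pv_find_char_none _ _ h1) (pv_find_char_none _ _ h2)]
    have e1 : (f1 != -1) = false := by simp [h1]
    have e2 : (f2 != -1) = false := by simp [h2]
    have : [f1, f2].filter (fun i => i != -1) = ([] : List Int) := by
      simp [List.filter, e1, e2]
    rw [this]
    simp [PySem.List.min?]
  · -- only ',' occurs
    have hnn : 0 ≤ f2 := by omega
    obtain ⟨hat, hm2⟩ := pv_find_char_some lower.toList ',' hnn
    have hcast : ((f2.toNat : Nat) : Int) = f2 := Int.toNat_of_nonneg hnn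
    have e1 : (f1 != -1) = false := by simp [h1]
    have e2 : (f2 != -1) = true := bne_iff_ne.mpr h2
    have hfil : [f1, f2].filter (fun i => i != -1) = [f2] := by
      simp [List.filter, e1, e2]
    rw [hfil]
    have hmn : PySem.List.min? [f2] id = some f2 := by simp [PySem.List.min?]
    rw [hmn]
    rw [pv_case_sep text lower f2.toNat ',' hat (Or.inr rfl)
      (fun j hj => ⟨pv_find_char_none _ _ h1 j, hm2 j hj⟩)]
    rw [hcast]
  · -- only ':' occurs
    have hnn : 0 ≤ f1 := by omega
    obtain ⟨hat, hm1⟩ := pv_find_char_some lower.toList ':' hnn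
    have hcast : ((f1.toNat : Nat) : Int) = f1 := Int.toNat_of_nonneg hnn
    have e1 : (f1 != -1) = true := bne_iff_ne.mpr h1
    have e2 : (f2 != -1) = false := by simp [h2]
    have hfil : [f1, f2].filter (fun i => i != -1) = [f1] := by
      simp [List.filter, e1, e2]
    rw [hfil]
    have hmn : PySem.List.min? [f1] id = some f1 := by simp [PySem.List.min?]
    rw [hmn]
    rw [pv_case_sep text lower f1.toNat ':' hat (Or.inl rfl)
      (fun j hj => ⟨hm1 j hj, pv_find_char_none _ _ h2 j⟩)]
    rw [hcast]
  · -- both occur: split on which comes first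
    have hnn1 : 0 ≤ f1 := by omega
    have hnn2 : 0 ≤ f2 := by omega
    obtain ⟨hat1, hm1⟩ := pv_find_char_some lower.toList ':' hnn1
    obtain ⟨hat2, hm2⟩ := pv_find_char_some lower.toList ',' hnn2
    have e1 : (f1 != -1) = true := bne_iff_ne.mpr h1
    have e2 : (f2 != -1) = true := bne_iff_ne.mpr h2
    have hfil : [f1, f2].filter (fun i => i != -1) = [f1, f2] := by
      simp [List.filter, e1, e2]
    rw [hfil]
    rcases (by omega : f1 ≤ f2 ∨ f2 < f1) with hle | hlt
    · have hmn : PySem.List.min? [f1, f2] id = some f1 := by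
        simp [PySem.List.min?]
        omega
      rw [hmn]
      have hcast : ((f1.toNat : Nat) : Int) = f1 := Int.toNat_of_nonneg hnn1
      have htn : f1.toNat ≤ f2.toNat := by omega
      rw [pv_case_sep text lower f1.toNat ':' hat1 (Or.inl rfl)
        (fun j hj => ⟨hm1 j hj, hm2 j (by omega)⟩)]
      rw [hcast]
    · have hmn : PySem.List.min? [f1, f2] id = some f2 := by
        simp [PySem.List.min?]
        omega
      rw [hmn]
      have hcast : ((f2.toNat : Nat) : Int) = f2 := Int.toNat_of_nonneg hnn2
      rw [pv_case_sep text lower f2.toNat ',' hat2 (Or.inr rfl)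
        (fun j hj => ⟨hm1 j (by omega), hm2 j hj⟩)]
      rw [hcast]

-- ===== VERDICT (by name: the statement is the Claim_ definition above) =====
theorem parse_agent_spec : Claim_equal_parse_agent := by
  intro text _
  unfold Spec_parse_agent
  exact pv_main text
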